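-- pv_equiv track=rewrite | github.com/Chanchan2/algorithm-study | programmers/2개 이하로 다른 비트.py | solution
-- ===== SOURCE A (Python) =====
-- def solution(numbers):
--     answer = []
--     for number in numbers :
--         rest = number % 4
--         if rest  <= 2 :
--             answer.append(number + 1)
--         else :
--             temp = '0' + bin(number)[2:]
--             for i in range(len(temp)-1, -1, -1):
--                 if temp[i] == '0':
--                     answer.append(int(temp[0:i] + "10" + temp[i+2:],2))
--                     break
--     return answer
-- ===== SOURCE B (Python) =====
-- def solution(numbers):
--     # Same per-element rule, but the number%4==3 case is pure bit arithmetic: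
--     # the lowest unset bit of number is the lowest set bit of number+1,
--     # i.e. (number+1) & -(number+1); the answer adds half of it.
--     return [n + 1 if n % 4 <= 2 else n + (((n + 1) & -(n + 1)) // 2) for n in numbers]
-- ===== Notes on version B (the rewrite author's own statement) =====
-- stated objective: simpler
-- what changed: The number%4==3 case no longer builds a binary string and scans it right-to-left for the rightmost '0'; B computes the lowest unset bit directly with (n+1)&-(n+1) and adds half of it, turning the whole function into a single comprehension.
-- outside the precondition, e.g. on solution([-5]): A returns [6], B returns [-3]
import Mathlib
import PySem

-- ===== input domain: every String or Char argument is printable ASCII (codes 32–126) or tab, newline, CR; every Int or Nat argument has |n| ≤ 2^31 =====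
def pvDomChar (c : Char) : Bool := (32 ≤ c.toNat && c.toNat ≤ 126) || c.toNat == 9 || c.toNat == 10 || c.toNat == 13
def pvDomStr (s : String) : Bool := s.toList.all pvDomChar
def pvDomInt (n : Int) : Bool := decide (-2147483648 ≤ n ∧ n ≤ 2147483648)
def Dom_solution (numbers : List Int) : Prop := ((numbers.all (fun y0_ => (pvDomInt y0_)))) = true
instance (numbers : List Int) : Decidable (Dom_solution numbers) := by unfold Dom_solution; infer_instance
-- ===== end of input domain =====

-- B replaces A's binary-string build + right-to-left scan (the number%4==3 case) with direct
-- bit arithmetic ((n+1) & -(n+1)), making the whole function a single comprehension.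


-- ===== PORT A =====
-- hand port of this call site's int(s, 2): the argument is always a nonempty string of
-- '0'/'1' characters (no sign, whitespace, underscores or '0b' prefix), where int(s, 2)
-- returns the base-2 value of the digits; exact there.
def solutionParse2 (cs : List Char) : Int :=
  cs.foldl (fun a c => 2 * a + (if c = '1' then 1 else 0)) 0

-- the inner `for i in range(len(temp)-1, -1, -1): if temp[i] == '0': …; break`;
-- fuel j+1 means the loop is at index i = j (so temp[i] is always in range);
-- none = the loop ran out without hitting break (then Python appends nothing).
def solutionScan (temp : List Char) : Nat → Option Int
  | 0 => none
  | j + 1 =>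
    if temp.getD j ' ' = '0' then
      -- temp[0:i] + "10" + temp[i+2:] with 0 ≤ i, exactly take/drop
      some (solutionParse2 (temp.take j ++ ['1', '0'] ++ temp.drop (j + 2)))
    else solutionScan temp j

def solutionBody (answer : List Int) (number : Int) : List Int :=
  let rest := PySem.Int.mod number 4
  if rest ≤ 2 then answer ++ [number + 1]
  else
    let temp := '0' :: (PySem.Int.toBinChars0b number).drop 2   -- '0' + bin(number)[2:]
    match solutionScan temp temp.length with
    | some v => answer ++ [v]
    | none => answer

def solution (numbers : List Int) : List Int :=
  numbers.foldl solutionBody []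

-- ===== PORT B =====
def solutionAltElem (n : Int) : Int :=
  if PySem.Int.mod n 4 ≤ 2 then n + 1
  else n + PySem.Int.floordiv (PySem.Int.band (n + 1) (-(n + 1))) 2

def solution_alt (numbers : List Int) : List Int :=
  numbers.map solutionAltElem

-- ===== PRECONDITION & SPEC =====
-- Pre_ excludes exactly the elements that are negative with n % 4 == 3 (Python mod): there
-- A's string surgery over Python's '-0b…' text accidentally returns a value computed from
-- |n| with the sign dropped; all other elements (including other negatives) are covered.
def Pre_solution (numbers : List Int) : Prop := ∀ n ∈ numbers, 0 ≤ n ∨ PySem.Int.mod n 4 ≤ 2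
instance (numbers : List Int) : Decidable (Pre_solution numbers) := by unfold Pre_solution; infer_instance

def pvWitness_solution : List Int := [3, 0, 7, 11, -6, 2147483647]

def Spec_solution (numbers : List Int) (out : List Int) : Prop := out = solution_alt numbers
instance (numbers : List Int) (out : List Int) : Decidable (Spec_solution numbers out) := by unfold Spec_solution; infer_instance

-- ===== CLAIM (what is proved, stated in full; the proofs are below) =====
def Claim_equal_solution : Prop := ∀ (numbers : List Int), Dom_solution numbers → Pre_solution numbers → Spec_solution numbers (solution numbers)

-- ===== LEMMAS AND PROOFS =====

-- the Nat value of a binary digit / digit string (spec twin of solutionParse2)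
def pvBit (c : Char) : Nat := if c = '1' then 1 else 0
def pvVal (cs : List Char) : Nat := cs.foldl (fun a c => 2 * a + pvBit c) 0

theorem pvVal_from (cs : List Char) : ∀ a : Nat,
    cs.foldl (fun a c => 2 * a + pvBit c) a = a * 2 ^ cs.length + pvVal cs := by
  induction cs with
  | nil => intro a; simp [pvVal]
  | cons c cs ih =>
    intro a
    simp only [List.foldl_cons, List.length_cons, pvVal]
    rw [ih (2 * a + pvBit c), ih (2 * 0 + pvBit c)]
    ring

theorem pvVal_cons (c : Char) (cs : List Char) :
    pvVal (c :: cs) = pvBit c * 2 ^ cs.length + pvVal cs := by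
  show cs.foldl _ (2 * 0 + pvBit c) = _
  rw [pvVal_from]; ring_nf

theorem pvVal_append (l₁ l₂ : List Char) :
    pvVal (l₁ ++ l₂) = pvVal l₁ * 2 ^ l₂.length + pvVal l₂ := by
  show (l₁ ++ l₂).foldl _ 0 = _
  rw [List.foldl_append, pvVal_from]; rfl

theorem pvVal_replicate (t : Nat) : pvVal (List.replicate t '1') = 2 ^ t - 1 := by
  induction t with
  | zero => simp [pvVal]
  | succ t ih =>
    rw [List.replicate_succ, pvVal_cons, ih]
    have : 1 ≤ 2 ^ t := Nat.one_le_two_pow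
    simp [pvBit]; omega

theorem solutionParse2_eq (cs : List Char) : solutionParse2 cs = (pvVal cs : Int) := by
  suffices h : ∀ a : Nat, cs.foldl (fun a c => 2 * a + (if c = '1' then 1 else 0)) (a : Int)
      = ((cs.foldl (fun a c => 2 * a + pvBit c) a : Nat) : Int) by
    simpa [solutionParse2, pvVal] using h 0
  induction cs with
  | nil => intro a; simp
  | cons c cs ih =>
    intro a
    simp only [List.foldl_cons]
    rw [show (2 * (a : Int) + (if c = '1' then 1 else 0)) = ((2 * a + pvBit c : Nat) : Int) by
      by_cases h : c = '1' <;> simp [pvBit, h]]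
    exact ih _

-- Nat.toDigits 2 produces a nonempty binary-digit string with value n
theorem toDigitsCore_spec : ∀ (f n : Nat) (ds : List Char), n < f →
    ∃ D : List Char, Nat.toDigitsCore 2 f n ds = D ++ ds ∧ D ≠ [] ∧
      (∀ c ∈ D, c = '0' ∨ c = '1') ∧ pvVal D = n := by
  intro f
  induction f with
  | zero => intro n ds h; omega
  | succ f ih =>
    intro n ds _h
    rw [Nat.toDigitsCore]
    by_cases h2 : n / 2 = 0
    · refine ⟨[(n % 2).digitChar], by simp [h2], by simp, ?_, ?_⟩
      · have hn2 : n = 0 ∨ n = 1 := by omega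
        rcases hn2 with rfl | rfl <;> simp [Nat.digitChar]
      · have hn2 : n = 0 ∨ n = 1 := by omega
        rcases hn2 with rfl | rfl <;> simp [pvVal, pvBit, Nat.digitChar]
    · simp only [h2, if_false]
      obtain ⟨D, hD, hne, hch, hval⟩ := ih (n / 2) ((n % 2).digitChar :: ds) (by omega)
      have hdigit : (n % 2).digitChar = '0' ∨ (n % 2).digitChar = '1' := by
        have : n % 2 = 0 ∨ n % 2 = 1 := by omega
        rcases this with h | h <;> simp [h, Nat.digitChar]
      refine ⟨D ++ [(n % 2).digitChar], by simpa using hD, by simp, ?_, ?_⟩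
      · intro c hc
        rcases List.mem_append.1 hc with h | h
        · exact hch c h
        · simp at h; subst h; exact hdigit
      · rw [pvVal_append]
        have hb : pvBit (n % 2).digitChar = n % 2 := by
          have : n % 2 = 0 ∨ n % 2 = 1 := by omega
          rcases this with h | h <;> simp [h, pvBit, Nat.digitChar]
        have : pvVal [(n % 2).digitChar] = n % 2 := by simp [pvVal, hb]
        rw [this, hval]
        simp
        omega

theorem toDigits_spec (n : Nat) :
    ∃ D : List Char, Nat.toDigits 2 n = D ∧ D ≠ [] ∧
      (∀ c ∈ D, c = '0' ∨ c = '1') ∧ pvVal D = n := by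
  obtain ⟨D, hD, hne, hch, hval⟩ := toDigitsCore_spec (n + 1) n [] (by omega)
  exact ⟨D, by simpa [Nat.toDigits] using hD, hne, hch, hval⟩

-- every '0'-headed binary string splits at its last '0'
theorem splitTrailing : ∀ l : List Char, (∀ c ∈ l, c = '0' ∨ c = '1') →
    ∃ pre t, ('0' :: l) = pre ++ '0' :: List.replicate t '1' := by
  intro l
  induction l using List.reverseRecOn with
  | nil => exact fun _ => ⟨[], 0, by simp⟩
  | append_singleton l c ih =>
    intro hc
    rcases hc c (by simp) with rfl | rfl
    · exact ⟨'0' :: l, 0, by simp⟩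
    · obtain ⟨pre, t, h⟩ := ih (fun c hm => hc c (by simp [hm]))
      refine ⟨pre, t + 1, ?_⟩
      have : ('0' :: (l ++ ['1'])) = ('0' :: l) ++ ['1'] := by simp
      rw [this, h, List.replicate_succ' (n := t)]
      simp

theorem getD_rep (pre : List Char) (t k : Nat) (hk : k < t) :
    (pre ++ '0' :: List.replicate t '1').getD (pre.length + 1 + k) ' ' = '1' := by
  have h1 : pre.length + 1 + k = pre.length + (1 + k) := by omega
  rw [List.getD, h1, List.getElem?_append_right (by omega)]
  simp only [Nat.add_sub_cancel_left]
  rw [Nat.add_comm 1 k, List.getElem?_cons_succ]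
  simp [hk]

theorem getD_zero (pre : List Char) (t : Nat) :
    (pre ++ '0' :: List.replicate t '1').getD pre.length ' ' = '0' := by
  rw [List.getD, show pre.length = pre.length + 0 by omega,
    List.getElem?_append_right (by omega)]
  simp

theorem scan_ones (pre : List Char) (t : Nat) : ∀ k, k ≤ t →
    solutionScan (pre ++ '0' :: List.replicate t '1') (pre.length + 1 + k)
      = solutionScan (pre ++ '0' :: List.replicate t '1') (pre.length + 1) := by
  intro k
  induction k with
  | zero => intro _; rfl
  | succ k ih =>
    intro hk
    have : pre.length + 1 + (k + 1) = (pre.length + 1 + k) + 1 := by omega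
    rw [this, solutionScan, getD_rep pre t k (by omega)]
    rw [if_neg (by decide)]
    exact ih (by omega)

theorem scan_hit (pre : List Char) (t : Nat) (_ht : 1 ≤ t) :
    solutionScan (pre ++ '0' :: List.replicate t '1') (pre.length + 1)
      = some (solutionParse2 (pre ++ '1' :: '0' :: List.replicate (t - 1) '1')) := by
  rw [solutionScan, getD_zero, if_pos rfl]
  congr 1
  have htake : (pre ++ '0' :: List.replicate t '1').take pre.length = pre := List.take_left
  have hdrop : (pre ++ '0' :: List.replicate t '1').drop (pre.length + 2)
      = List.replicate (t - 1) '1' := by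
    have : pre ++ '0' :: List.replicate t '1' = (pre ++ ['0']) ++ List.replicate t '1' := by simp
    rw [this, show pre.length + 2 = (pre ++ ['0']).length + 1 by simp,
      List.drop_append]
    simp
  rw [htake, hdrop]
  simp

-- clearing the lowest set bit
theorem and_clear (P t : Nat) :
    (P * 2 ^ (t + 1) + 2 ^ t) &&& (P * 2 ^ (t + 1) + 2 ^ t - 1) = P * 2 ^ (t + 1) := by
  have h1 : 1 ≤ 2 ^ t := Nat.one_le_two_pow
  have hlt : (2 : Nat) ^ t < 2 ^ (t + 1) := by rw [pow_succ]; omega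
  have hpos : 0 < (2 : Nat) ^ (t + 1) := by positivity
  apply Nat.eq_of_testBit_eq
  intro i
  rw [Nat.testBit_and]
  simp only [Nat.testBit_eq_decide_div_mod_eq]
  rcases lt_trichotomy i t with hi | rfl | hi
  · -- i < t : bit i of X and of P * 2^(t+1) are both 0
    obtain ⟨d, hd⟩ : ∃ d, t = i + (d + 1) := ⟨t - i - 1, by omega⟩
    have ht1 : (2 : Nat) ^ (t + 1) = 2 ^ (d + 2) * 2 ^ i := by
      rw [show t + 1 = (d + 2) + i by omega, pow_add]
    have ht0 : (2 : Nat) ^ t = 2 ^ (d + 1) * 2 ^ i := by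
      rw [show t = (d + 1) + i by omega, pow_add]
    have e1 : (P * 2 ^ (t + 1) + 2 ^ t) / 2 ^ i = 2 * (P * 2 ^ (d + 1) + 2 ^ d) := by
      rw [ht1, ht0, show P * (2 ^ (d + 2) * 2 ^ i) + 2 ^ (d + 1) * 2 ^ i
          = 2 * (P * 2 ^ (d + 1) + 2 ^ d) * 2 ^ i by rw [pow_succ, pow_succ]; ring]
      exact Nat.mul_div_cancel _ (by positivity)
    have e2 : P * 2 ^ (t + 1) / 2 ^ i = 2 * (P * 2 ^ (d + 1)) := by
      rw [ht1, show P * (2 ^ (d + 2) * 2 ^ i) = 2 * (P * 2 ^ (d + 1)) * 2 ^ i by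
        rw [pow_succ]; ring]
      exact Nat.mul_div_cancel _ (by positivity)
    rw [e1, e2]
    simp [Nat.mul_mod_right]
  · -- i = t : bit t of X - 1 and of P * 2^(t+1) are both 0
    have e1 : (P * 2 ^ (i + 1) + 2 ^ i - 1) / 2 ^ i = 2 * P := by
      rw [show P * 2 ^ (i + 1) + 2 ^ i - 1 = (2 ^ i - 1) + 2 ^ i * (2 * P) by
        rw [pow_succ]; ring_nf; omega]
      rw [Nat.add_mul_div_left _ _ (by positivity), Nat.div_eq_of_lt (by omega)]
      omega
    have e2 : P * 2 ^ (i + 1) / 2 ^ i = 2 * P := by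
      rw [show P * 2 ^ (i + 1) = 2 ^ i * (2 * P) by rw [pow_succ]; ring]
      rw [Nat.mul_div_cancel_left _ (by positivity)]
    rw [e1, e2]
    simp [Nat.mul_mod_right]
  · -- i > t : bits i of X, X - 1 and P * 2^(t+1) coincide
    obtain ⟨k, hk⟩ : ∃ k, i = (t + 1) + k := ⟨i - t - 1, by omega⟩
    have epow : (2 : Nat) ^ i = 2 ^ (t + 1) * 2 ^ k := by rw [hk, pow_add]
    have e0 : (P * 2 ^ (t + 1) + 2 ^ t) / 2 ^ (t + 1) = P := by
      rw [show P * 2 ^ (t + 1) + 2 ^ t = 2 ^ t + 2 ^ (t + 1) * P by ring]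
      rw [Nat.add_mul_div_left _ _ hpos, Nat.div_eq_of_lt hlt]; omega
    have e0' : (P * 2 ^ (t + 1) + 2 ^ t - 1) / 2 ^ (t + 1) = P := by
      rw [show P * 2 ^ (t + 1) + 2 ^ t - 1 = (2 ^ t - 1) + 2 ^ (t + 1) * P by
        have := Nat.one_le_two_pow (n := t); ring_nf; omega]
      rw [Nat.add_mul_div_left _ _ hpos, Nat.div_eq_of_lt (by omega)]; omega
    have e0'' : P * 2 ^ (t + 1) / 2 ^ (t + 1) = P := Nat.mul_div_cancel _ hpos
    have eq1 : (P * 2 ^ (t + 1) + 2 ^ t) / 2 ^ i = P / 2 ^ k := by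
      rw [epow, ← Nat.div_div_eq_div_mul, e0]
    have eq2 : (P * 2 ^ (t + 1) + 2 ^ t - 1) / 2 ^ i = P / 2 ^ k := by
      rw [epow, ← Nat.div_div_eq_div_mul, e0']
    have eq3 : P * 2 ^ (t + 1) / 2 ^ i = P / 2 ^ k := by
      rw [epow, ← Nat.div_div_eq_div_mul, e0'']
    rw [eq1, eq2, eq3]
    cases h : decide (P / 2 ^ k % 2 = 1) <;> simp_all

theorem band_low (m P t : Nat) (h : m + 1 = P * 2 ^ (t + 1) + 2 ^ t) :
    PySem.Int.band ((m : Int) + 1) (-((m : Int) + 1)) = ((2 ^ t : Nat) : Int) := by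
  have h0 : (0 : Int) ≤ (m : Int) + 1 := by positivity
  have h1 : ¬ (0 : Int) ≤ -((m : Int) + 1) := by omega
  rw [PySem.Int.band, if_pos h0, if_neg h1]
  have e1 : ((m : Int) + 1).toNat = m + 1 := by omega
  have e2 : (-(-((m : Int) + 1)) - 1).toNat = m := by omega
  rw [e1, e2]
  have hm : m = P * 2 ^ (t + 1) + 2 ^ t - 1 := by omega
  rw [h, hm, and_clear P t]
  congr 1
  have : 1 ≤ (2:Nat) ^ t := Nat.one_le_two_pow
  omega

theorem body_eq (acc : List Int) (n : Int) (hn : 0 ≤ n ∨ PySem.Int.mod n 4 ≤ 2) :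
    solutionBody acc n = acc ++ [solutionAltElem n] := by
  unfold solutionBody solutionAltElem
  by_cases hle : PySem.Int.mod n 4 ≤ 2
  · simp only [if_pos hle]
  · have hn0 : 0 ≤ n := hn.resolve_right hle
    obtain ⟨m, rfl⟩ : ∃ m : Nat, n = (m : Int) := ⟨n.toNat, (Int.toNat_of_nonneg hn0).symm⟩
    rw [show (4 : Int) = ((4 : Nat) : Int) by norm_num, PySem.Int.mod_natCast] at hle ⊢
    rw [if_neg hle, if_neg hle]
    have h4 : m % 4 = 3 := by omega
    have htemp : ('0' :: (PySem.Int.toBinChars0b ((m : Nat) : Int)).drop 2)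
        = '0' :: Nat.toDigits 2 m := by
      simp [PySem.Int.toBinChars0b, show ¬ (((m : Nat) : Int) < 0) by omega]
    obtain ⟨D, hD, hne, hch, hval⟩ := toDigits_spec m
    obtain ⟨pre, t, hsplit⟩ := splitTrailing D hch
    have h2t : 1 ≤ (2 : Nat) ^ t := Nat.one_le_two_pow
    -- the value identity m = pvVal pre * 2^(t+1) + (2^t - 1)
    have hm : m = pvVal pre * 2 ^ (t + 1) + (2 ^ t - 1) := by
      have h01 : pvVal ('0' :: D) = pvVal D := by
        rw [pvVal_cons]; simp [pvBit]
      rw [← hval, ← h01, hsplit, pvVal_append, pvVal_cons, pvVal_replicate]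
      simp [pvBit, pow_succ]
    have ht2 : 2 ≤ t := by
      rcases t with _ | t
      · rw [pow_one] at hm; omega
      · rcases t with _ | t
        · norm_num at hm; omega
        · omega
    obtain ⟨u, rfl⟩ : ∃ u, t = u + 1 := ⟨t - 1, by omega⟩
    have h2u : 1 ≤ (2 : Nat) ^ u := Nat.one_le_two_pow
    have e1 : (2 : Nat) ^ (u + 1) = 2 * 2 ^ u := by rw [pow_succ]; ring
    have e2 : (2 : Nat) ^ (u + 1 + 1) = 2 * 2 ^ (u + 1) := by rw [pow_succ]; ring
    have hmp1 : m + 1 = pvVal pre * 2 ^ (u + 1 + 1) + 2 ^ (u + 1) := by omega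
    -- A's scan finds the rightmost '0' and returns m + 2^u
    have hAval : solutionParse2 (pre ++ '1' :: '0' :: List.replicate u '1')
        = ((m + 2 ^ u : Nat) : Int) := by
      rw [solutionParse2_eq]
      congr 1
      rw [pvVal_append, pvVal_cons, pvVal_cons, pvVal_replicate]
      simp only [pvBit, List.length_cons, List.length_replicate]
      norm_num
      rw [if_neg (by decide : ¬ ('0' : Char) = '1')]
      omega
    have hlen : ('0' :: Nat.toDigits 2 m).length = pre.length + 1 + (u + 1) := by
      rw [hD, hsplit]; simp; omega
    have key : solutionScan ('0' :: (PySem.Int.toBinChars0b ((m : Nat) : Int)).drop 2)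
        (('0' :: (PySem.Int.toBinChars0b ((m : Nat) : Int)).drop 2).length)
        = some ((m + 2 ^ u : Nat) : Int) := by
      rw [htemp, hlen, hD, hsplit, scan_ones pre (u + 1) (u + 1) le_rfl,
        scan_hit pre (u + 1) (by omega), Nat.add_sub_cancel, hAval]
    -- B's arithmetic gives the same value
    have hB : ((m : Nat) : Int) + PySem.Int.floordiv
        (PySem.Int.band (((m : Nat) : Int) + 1) (-(((m : Nat) : Int) + 1))) 2
        = ((m + 2 ^ u : Nat) : Int) := by
      rw [band_low m (pvVal pre) (u + 1) hmp1,
        show (2 : Int) = ((2 : Nat) : Int) by norm_num, PySem.Int.floordiv_natCast]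
      rw [show (2 : Nat) ^ (u + 1) / 2 = 2 ^ u by rw [pow_succ]; simp]
      push_cast
      ring
    simp only [key, hB]

theorem fold_map : ∀ (l : List Int) (acc : List Int), (∀ n ∈ l, 0 ≤ n ∨ PySem.Int.mod n 4 ≤ 2) →
    l.foldl solutionBody acc = acc ++ l.map solutionAltElem := by
  intro l
  induction l with
  | nil => intro acc _; simp
  | cons x l ih =>
    intro acc hx
    rw [List.foldl_cons, body_eq acc x (hx x (by simp)),
      ih _ (fun n hn => hx n (by simp [hn]))]
    simp

-- ===== VERDICT (by name: the statement is the Claim_ definition above) =====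
theorem solution_spec : Claim_equal_solution := by
  intro numbers _ hpre
  unfold Spec_solution solution solution_alt
  simpa using fold_map numbers [] hpre
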